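-- pv_equiv track=rewrite | github.com/pymmcore-plus/ome-writers | src/ome_writers/_schema.py | _ome_stem_suffix
-- ===== SOURCE A (Python) =====
-- def _ome_stem_suffix(path: str) -> tuple[str, str]:
--     """Return the stem of an OME file, removing .ome and image container suffixes.
--
--     Examples
--     --------
--     >>> _ome_stem_suffix("data/image.tiff")
--     ('data/image', '.tiff')
--     >>> _ome_stem_suffix("data/image.ome.tiff")
--     ('data/image', '.ome.tiff')
--
--     # other periods are preserved
--     >>> _ome_stem_suffix("data/image.test.ome.tiff")
--     ('data/image.test', '.ome.tiff')
--
--     # only *trailing* [.ome].ext is removed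
--     >>> _ome_stem_suffix("data/image.ome.test.zarr")
--     ('data/image.ome.test', '.zarr')
--     >>> _ome_stem_suffix("data/image.ome.test")
--     ('data/image.ome.test', '')
--     """
--     str_path = str(path)
--     lower = str_path.lower()
--     for ext in (".tiff", ".tif", ".zarr"):
--         if lower.endswith(ext):
--             result = str_path[: -len(ext)]
--             if result.lower().endswith(".ome"):
--                 return result[:-4], f".ome{ext}"
--             return result, ext
--     return path, ""
-- ===== SOURCE B (Python) =====
-- def _ome_stem_suffix(path: str) -> tuple[str, str]:
--     """Split once at the final dot instead of scanning with three endswith checks."""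
--     root, dot, seg = str(path).rpartition(".")
--     if not dot or seg.lower() not in {"tiff", "tif", "zarr"}:
--         return path, ""
--     ext = "." + seg.lower()
--     if root.lower().endswith(".ome"):
--         return root[:-4], ".ome" + ext
--     return root, ext
-- ===== Notes on version B (the rewrite author's own statement) =====
-- stated objective: simpler
-- what changed: B splits the path once at its final dot with rpartition and decides by set membership of the lowercased last segment, instead of A's ordered loop of three case-insensitive endswith scans and re-slicing.
import Mathlib
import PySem

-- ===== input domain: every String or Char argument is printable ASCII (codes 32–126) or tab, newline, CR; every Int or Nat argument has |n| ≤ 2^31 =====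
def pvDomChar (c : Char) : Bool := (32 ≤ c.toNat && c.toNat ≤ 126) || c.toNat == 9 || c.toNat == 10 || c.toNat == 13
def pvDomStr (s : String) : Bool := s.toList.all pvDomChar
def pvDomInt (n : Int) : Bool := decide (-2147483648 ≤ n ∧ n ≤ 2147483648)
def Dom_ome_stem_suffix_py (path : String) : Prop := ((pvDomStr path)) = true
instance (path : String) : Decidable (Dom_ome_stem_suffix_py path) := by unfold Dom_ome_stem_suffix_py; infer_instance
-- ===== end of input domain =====

-- B replaces A's ordered loop of three case-insensitive endswith scans by ONE split at the
-- final dot (rpartition) plus a membership test of the lowercased last segment (objective: simpler).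

-- ===== PORT A =====
-- the tuple A iterates over, in A's order
def omeExtsA : List (List Char) := [".tiff".toList, ".tif".toList, ".zarr".toList]

-- A's for-loop: first extension matching `lower` wins; none = fall through to the final return
def omeLoopA (sp low : List Char) (exts : List (List Char)) : Option (List Char × List Char) :=
  match exts with
  | [] => none
  | ext :: rest =>
    if PySem.Chars.endswith low ext then
      let result := PySem.List.slice sp none (some (-(ext.length : Int)))
      if PySem.Chars.endswith (PySem.Chars.lower result) ".ome".toList then
        some (PySem.List.slice result none (some (-4)), ".ome".toList ++ ext)
      else
        some (result, ext)
    else omeLoopA sp low rest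

def ome_stem_suffix_py (path : String) : String × String :=
  let strPath := path.toList
  let low := PySem.Chars.lower strPath
  match omeLoopA strPath low omeExtsA with
  | some (a, b) => (String.ofList a, String.ofList b)
  | none => (path, "")

-- ===== PORT B =====
-- str.rpartition('.') specialised to '.': (part before last dot, dot found?, part after last dot)
def rpartitionDot (cs : List Char) : List Char × Bool × List Char :=
  match List.span (fun c => c != '.') cs.reverse with
  | (_, []) => ([], false, cs)
  | (segR, _ :: preR) => (preR.reverse, true, segR.reverse)

-- the container-extension set B looks the lowercased last segment up in
def omeContainers : List (List Char) := ["tiff".toList, "tif".toList, "zarr".toList]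

def ome_stem_suffix_py_alt (path : String) : String × String :=
  let (root, found, seg) := rpartitionDot path.toList
  let segLow := PySem.Chars.lower seg
  if !found || !(omeContainers.contains segLow) then
    (path, "")
  else
    let ext := '.' :: segLow
    if PySem.Chars.endswith (PySem.Chars.lower root) ".ome".toList then
      (String.ofList (PySem.List.slice root none (some (-4))), String.ofList (".ome".toList ++ ext))
    else
      (String.ofList root, String.ofList ext)

-- ===== PRECONDITION & SPEC =====
def Spec_ome_stem_suffix_py (path : String) (out : String × String) : Prop := out = ome_stem_suffix_py_alt path
instance (path : String) (out : String × String) : Decidable (Spec_ome_stem_suffix_py path out) := by unfold Spec_ome_stem_suffix_py; infer_instance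

-- ===== CLAIM (what is proved, stated in full; the proofs are below) =====
def Claim_equal_ome_stem_suffix_py : Prop := ∀ (path : String), Dom_ome_stem_suffix_py path → Spec_ome_stem_suffix_py path (ome_stem_suffix_py path)

-- ===== LEMMAS AND PROOFS =====

-- Python's lower() maps no character to '.'
theorem lowerChar_eq_dot {c : Char} (h : PySem.Chars.lowerChar c = '.') : c = '.' := by
  unfold PySem.Chars.lowerChar PySem.Chars.isupper at h
  split at h
  · next hu =>
    simp only [Bool.and_eq_true, decide_eq_true_eq] at hu
    have h1 : 65 ≤ c.toNat := hu.1
    have h2 : c.toNat ≤ 90 := hu.2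
    exfalso
    have hv : (c.toNat + 32).isValidChar := by left; omega
    have ht : (Char.ofNat (c.toNat + 32)).toNat = c.toNat + 32 := by
      rw [Char.toNat_ofNat, if_pos hv]
    have h3 : (Char.ofNat (c.toNat + 32)).toNat = ('.' : Char).toNat := by rw [h]
    have hd : ('.' : Char).toNat = 46 := rfl
    omega
  · exact h

theorem dot_not_mem_lower {l : List Char} (h : '.' ∉ l) : '.' ∉ PySem.Chars.lower l := by
  unfold PySem.Chars.lower
  intro hm
  rcases List.mem_map.mp hm with ⟨c, hc, hlc⟩
  exact h (lowerChar_eq_dot hlc ▸ hc)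

-- structure of rpartitionDot
theorem rpartitionDot_spec (cs : List Char) :
    (rpartitionDot cs = ([], false, cs) ∧ '.' ∉ cs) ∨
    (∃ root seg, rpartitionDot cs = (root, true, seg) ∧ cs = root ++ '.' :: seg ∧ '.' ∉ seg) := by
  unfold rpartitionDot
  rw [List.span_eq_takeWhile_dropWhile]
  cases hd : List.dropWhile (fun c => c != '.') cs.reverse with
  | nil =>
    left
    refine ⟨rfl, ?_⟩
    intro hm
    have hall := List.dropWhile_eq_nil_iff.mp hd '.' (List.mem_reverse.mpr hm)
    simp at hall
  | cons d preR =>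
    right
    refine ⟨preR.reverse, (List.takeWhile (fun c => c != '.') cs.reverse).reverse, rfl, ?_, ?_⟩
    · have hne : List.dropWhile (fun c => c != '.') cs.reverse ≠ [] := by rw [hd]; simp
      have h2 := List.head_dropWhile_not (fun c => c != '.') hne
      simp only [hd, List.head_cons] at h2
      have hdd : d = '.' := by simpa using h2
      have hsplit : cs.reverse = List.takeWhile (fun c => c != '.') cs.reverse ++ d :: preR := by
        rw [← hd, List.takeWhile_append_dropWhile]
      conv_lhs => rw [← List.reverse_reverse cs, hsplit]
      simp [hdd]
    · intro hm
      have hmem : '.' ∈ List.takeWhile (fun c => c != '.') cs.reverse := List.mem_reverse.mp hm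
      have := List.mem_takeWhile_imp hmem
      simp at this

-- a suffix of the form '.':: e, with no dot in e nor in the last segment, pins e to that segment
theorem suffix_dot_iff {a b e : List Char} (hb : '.' ∉ b) (he : '.' ∉ e) :
    ('.' :: e <:+ a ++ '.' :: b) ↔ e = b := by
  constructor
  · intro hs
    have hb' : ('.' :: b) <:+ a ++ '.' :: b := List.suffix_append_of_suffix (List.suffix_refl _)
    rcases List.suffix_or_suffix_of_suffix hs hb' with h | h
    · rcases List.suffix_cons_iff.mp h with heq | htail
      · injection heq
      · exact absurd (htail.subset List.mem_cons_self) hb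
    · rcases List.suffix_cons_iff.mp h with heq | htail
      · injection heq with _ h2; exact h2.symm
      · exact absurd (htail.subset List.mem_cons_self) he
  · intro h
    rw [h]
    exact List.suffix_append_of_suffix (List.suffix_refl _)

theorem lower_append_dot (root seg : List Char) :
    PySem.Chars.lower (root ++ '.' :: seg)
      = PySem.Chars.lower root ++ '.' :: PySem.Chars.lower seg := by
  unfold PySem.Chars.lower
  simp [List.map_append]
  rfl

-- no dot in the string at all: no '.xxx' suffix can match
theorem endswith_no_dot {cs p : List Char} (hcs : '.' ∉ cs) (hp : '.' ∈ p) :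
    PySem.Chars.endswith (PySem.Chars.lower cs) p = false := by
  cases h : PySem.Chars.endswith (PySem.Chars.lower cs) p with
  | false => rfl
  | true =>
    have hs := (PySem.Chars.endswith_iff _ _).mp h
    exact absurd (hs.subset hp) (dot_not_mem_lower hcs)

-- with a final dot, a '.':: e suffix matches exactly when the lowercased last segment is e
theorem endswith_match {root seg e : List Char} (hnd : '.' ∉ seg) (he : '.' ∉ e) :
    PySem.Chars.endswith (PySem.Chars.lower (root ++ '.' :: seg)) ('.' :: e)
      = decide (PySem.Chars.lower seg = e) := by
  rw [Bool.eq_iff_iff]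
  rw [PySem.Chars.endswith_iff, lower_append_dot]
  rw [suffix_dot_iff (dot_not_mem_lower hnd) he]
  simp [eq_comm]

-- A's slice str_path[:-len(ext)] recovers the part before the final dot
theorem slice_root (root seg : List Char) (k : Nat) (hk : 0 < k) (hlen : seg.length + 1 = k) :
    PySem.List.slice (root ++ '.' :: seg) none (some (-(k : Int))) = root := by
  rw [PySem.List.slice_to_neg_natCast _ k hk]
  have hl : (root ++ '.' :: seg).length - k = root.length := by
    simp only [List.length_append, List.length_cons]
    omega
  rw [hl, List.take_left]

theorem lower_length (l : List Char) : (PySem.Chars.lower l).length = l.length := by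
  unfold PySem.Chars.lower; exact List.length_map ..

-- ===== VERDICT (by name: the statement is the Claim_ definition above) =====
theorem ome_stem_suffix_py_spec : Claim_equal_ome_stem_suffix_py := by
  intro path _
  unfold Spec_ome_stem_suffix_py ome_stem_suffix_py ome_stem_suffix_py_alt
  rcases rpartitionDot_spec path.toList with ⟨hrp, hnd⟩ | ⟨root, seg, hrp, hcs, hnd⟩
  · -- no dot in the path: both programs return (path, "")
    rw [hrp]
    have h1 := endswith_no_dot (p := ['.','t','i','f','f']) hnd (by decide)
    have h2 := endswith_no_dot (p := ['.','t','i','f']) hnd (by decide)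
    have h3 := endswith_no_dot (p := ['.','z','a','r','r']) hnd (by decide)
    simp [omeLoopA, omeExtsA, h1, h2, h3]
  · -- the path has a final dot: path.toList = root ++ '.' :: seg
    rw [hrp]
    have htiff : PySem.Chars.endswith (PySem.Chars.lower path.toList) ['.','t','i','f','f']
        = decide (PySem.Chars.lower seg = ['t','i','f','f']) := by
      rw [hcs]; exact endswith_match hnd (by decide)
    have htif : PySem.Chars.endswith (PySem.Chars.lower path.toList) ['.','t','i','f']
        = decide (PySem.Chars.lower seg = ['t','i','f']) := by
      rw [hcs]; exact endswith_match hnd (by decide)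
    have hzarr : PySem.Chars.endswith (PySem.Chars.lower path.toList) ['.','z','a','r','r']
        = decide (PySem.Chars.lower seg = ['z','a','r','r']) := by
      rw [hcs]; exact endswith_match hnd (by decide)
    have hseglen : ∀ e : List Char, PySem.Chars.lower seg = e → seg.length = e.length := by
      intro e he
      rw [← he, lower_length]
    have hres5 : seg.length = 4 →
        PySem.List.slice path.toList none (some (-(5 : Int))) = root := by
      intro hl
      rw [hcs, show (-(5 : Int)) = -((5 : Nat) : Int) from rfl]
      exact slice_root root seg 5 (by omega) (by omega)
    have hres4 : seg.length = 3 →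
        PySem.List.slice path.toList none (some (-(4 : Int))) = root := by
      intro hl
      rw [hcs, show (-(4 : Int)) = -((4 : Nat) : Int) from rfl]
      exact slice_root root seg 4 (by omega) (by omega)
    by_cases m1 : PySem.Chars.lower seg = ['t','i','f','f']
    · have hr := hres5 (by have := hseglen _ m1; simpa using this)
      cases hOme : PySem.Chars.endswith (PySem.Chars.lower root) ['.','o','m','e'] <;>
        simp [omeLoopA, omeExtsA, omeContainers, htiff, m1, hr, hOme]
    · by_cases m2 : PySem.Chars.lower seg = ['t','i','f']
      · have hr := hres4 (by have := hseglen _ m2; simpa using this)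
        cases hOme : PySem.Chars.endswith (PySem.Chars.lower root) ['.','o','m','e'] <;>
          simp [omeLoopA, omeExtsA, omeContainers, htiff, htif, m2, hr, hOme]
      · by_cases m3 : PySem.Chars.lower seg = ['z','a','r','r']
        · have hr := hres5 (by have := hseglen _ m3; simpa using this)
          cases hOme : PySem.Chars.endswith (PySem.Chars.lower root) ['.','o','m','e'] <;>
            simp [omeLoopA, omeExtsA, omeContainers, htiff, htif, hzarr, m3, hr, hOme]
        · simp [omeLoopA, omeExtsA, omeContainers, htiff, htif, hzarr, m1, m2, m3]
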